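-- pv_equiv track=rewrite | github.com/Nareeek/Codesignal_tasks | factorialsProductTrailingZeros.py | factorialsProductTrailingZeros
-- ===== SOURCE A (Python) =====
-- def factorialsProductTrailingZeros(l, r):
--     two = 0
--     five = 0
--     ctr = 0
--
--     for i in range(l, r + 1):
--         for j in range(1, i + 1):
--             if j % 25 == 0:
--                 ctr += 1
--             if j % 2 == 0:
--                 two += 1
--             if j % 5 == 0:
--                 five += 1
--     ctr += min(two, five)
--
--     return ctr
-- ===== SOURCE B (Python) =====
-- def factorialsProductTrailingZeros(l, r):
--     def S(n, k):
--         # sum of i // k for i in 1..n (0 if n < 1)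
--         if n < 0:
--             return 0
--         q, rem = divmod(n, k)
--         return k * q * (q - 1) // 2 + q * (rem + 1)
--     a = max(l, 1)
--     hi = max(r, a - 1)
--     two = S(hi, 2) - S(a - 1, 2)
--     five = S(hi, 5) - S(a - 1, 5)
--     ctr = S(hi, 25) - S(a - 1, 25)
--     return ctr + min(two, five)
-- ===== Notes on version B (the rewrite author's own statement) =====
-- stated objective: alternative
-- what changed: Both nested loops are gone: the counts of multiples of 2/5/25 are obtained from the closed-form sum S(n,k) of floor(i/k) for i=1..n, evaluated at the range ends, so the answer is a constant number of arithmetic operations.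
import Mathlib
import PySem

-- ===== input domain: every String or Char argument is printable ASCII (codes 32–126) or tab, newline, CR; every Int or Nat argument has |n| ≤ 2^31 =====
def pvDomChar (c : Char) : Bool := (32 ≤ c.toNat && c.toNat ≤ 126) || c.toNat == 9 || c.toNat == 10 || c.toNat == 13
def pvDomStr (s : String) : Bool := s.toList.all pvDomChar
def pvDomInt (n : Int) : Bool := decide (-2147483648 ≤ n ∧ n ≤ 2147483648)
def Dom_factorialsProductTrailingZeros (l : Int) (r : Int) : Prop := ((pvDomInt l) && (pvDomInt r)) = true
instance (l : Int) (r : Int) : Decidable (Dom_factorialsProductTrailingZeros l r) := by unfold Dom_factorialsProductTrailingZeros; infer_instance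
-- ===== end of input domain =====

-- B replaces A's nested counting loops by the closed-form sum S(n,k) of i//k for i = 1..n,
-- evaluated at the range ends (objective: alternative, loop-free closed form).

-- ===== PORT A =====
def factorialsProductTrailingZeros (l : Int) (r : Int) : Int :=
  let s := (PySem.List.pyRange l (r + 1) 1).foldl (fun (st : Int × Int × Int) i =>
    (PySem.List.pyRange 1 (i + 1) 1).foldl (fun (st : Int × Int × Int) j =>
      let ctr := if PySem.Int.mod j 25 == 0 then st.2.2 + 1 else st.2.2
      let two := if PySem.Int.mod j 2 == 0 then st.1 + 1 else st.1
      let five := if PySem.Int.mod j 5 == 0 then st.2.1 + 1 else st.2.1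
      (two, five, ctr)) st) ((0, 0, 0) : Int × Int × Int)
  s.2.2 + min s.1 s.2.1

-- ===== PORT B =====
-- helper S of Source B: sum of i // k for i in 1..n (0 if n < 1)
def pvS (n : Int) (k : Int) : Int :=
  if n < 0 then 0
  else
    let q := PySem.Int.floordiv n k
    let rem := PySem.Int.mod n k
    PySem.Int.floordiv (k * q * (q - 1)) 2 + q * (rem + 1)

def factorialsProductTrailingZeros_alt (l : Int) (r : Int) : Int :=
  let a := max l 1
  let hi := max r (a - 1)
  let two := pvS hi 2 - pvS (a - 1) 2
  let five := pvS hi 5 - pvS (a - 1) 5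
  let ctr := pvS hi 25 - pvS (a - 1) 25
  ctr + min two five

-- ===== PRECONDITION & SPEC =====
def Spec_factorialsProductTrailingZeros (l : Int) (r : Int) (out : Int) : Prop := out = factorialsProductTrailingZeros_alt l r
instance (l : Int) (r : Int) (out : Int) : Decidable (Spec_factorialsProductTrailingZeros l r out) := by unfold Spec_factorialsProductTrailingZeros; infer_instance

-- ===== CLAIM (what is proved, stated in full; the proofs are below) =====
def Claim_equal_factorialsProductTrailingZeros : Prop := ∀ (l : Int) (r : Int), Dom_factorialsProductTrailingZeros l r → Spec_factorialsProductTrailingZeros l r (factorialsProductTrailingZeros l r)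

-- ===== LEMMAS AND PROOFS =====

-- A's inner-loop step (as in the port of A) and the per-i increment it amounts to.
def pvStepA (st : Int × Int × Int) (j : Int) : Int × Int × Int :=
  let ctr := if PySem.Int.mod j 25 == 0 then st.2.2 + 1 else st.2.2
  let two := if PySem.Int.mod j 2 == 0 then st.1 + 1 else st.1
  let five := if PySem.Int.mod j 5 == 0 then st.2.1 + 1 else st.2.1
  (two, five, ctr)

def pvStepB (st : Int × Int × Int) (i : Int) : Int × Int × Int :=
  (st.1 + PySem.Int.floordiv i 2, st.2.1 + PySem.Int.floordiv i 5,
    st.2.2 + PySem.Int.floordiv i 25)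

def pvOuterA (st : Int × Int × Int) (i : Int) : Int × Int × Int :=
  (PySem.List.pyRange 1 (i + 1) 1).foldl pvStepA st

theorem pvFdivSucc (i k : Int) (hk : k = 2 ∨ k = 5 ∨ k = 25) :
    PySem.Int.floordiv (i + 1) k =
      PySem.Int.floordiv i k + (if PySem.Int.mod (i + 1) k == 0 then 1 else 0) := by
  have hk0 : (0 : Int) < k := by rcases hk with h | h | h <;> simp [h]
  rw [PySem.Int.floordiv_eq_ediv_of_pos hk0, PySem.Int.floordiv_eq_ediv_of_pos hk0,
    PySem.Int.mod_eq_emod_of_pos hk0]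
  simp only [beq_iff_eq]
  rcases hk with h | h | h <;> subst h <;> split_ifs with h <;> omega

theorem pvInnerEq (i : Int) (hi : 0 ≤ i) (st : Int × Int × Int) :
    pvOuterA st i = pvStepB st i := by
  induction i, hi using Int.le_induction generalizing st with
  | base =>
      rw [pvOuterA, PySem.List.pyRange_one_eq_nil (by omega : (0:Int) + 1 ≤ 1)]
      simp [pvStepB]
  | succ n hn ih =>
      unfold pvOuterA
      rw [show n + 1 + 1 = (n + 1) + 1 by ring,
        PySem.List.pyRange_one_succ_right (by omega : (1:Int) ≤ n + 1), List.foldl_append]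
      have := ih st
      unfold pvOuterA at this
      rw [this]
      simp only [List.foldl_cons, List.foldl_nil, pvStepA, pvStepB]
      rw [pvFdivSucc n 2 (by tauto), pvFdivSucc n 5 (by tauto), pvFdivSucc n 25 (by tauto)]
      simp only [Prod.mk.injEq]
      refine ⟨?_, ?_, ?_⟩ <;> split_ifs <;> ring

theorem pvSkipNonpos (n : Nat) (b : Int) (st : Int × Int × Int) :
    (PySem.List.pyRange (1 - (n : Int)) b 1).foldl pvOuterA st =
      (PySem.List.pyRange 1 b 1).foldl pvOuterA st := by
  induction n generalizing st with
  | zero => simp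
  | succ m ih =>
      push_cast
      by_cases hb : b ≤ 1 - ((m : Int) + 1)
      · rw [PySem.List.pyRange_one_eq_nil (by omega),
          PySem.List.pyRange_one_eq_nil (by omega)]
      · have hstep : pvOuterA st (1 - ((m : Int) + 1)) = st := by
          unfold pvOuterA
          rw [PySem.List.pyRange_one_eq_nil (by omega)]
          rfl
        rw [PySem.List.pyRange_one_cons (by omega)]
        simp only [List.foldl_cons]
        rw [show (1 : Int) - ((m : Int) + 1) + 1 = 1 - (m : Int) by ring, hstep]
        exact ih st

theorem pvFoldEq (a b : Int) (ha : 1 ≤ a) (st : Int × Int × Int) :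
    (PySem.List.pyRange a b 1).foldl pvOuterA st =
      (PySem.List.pyRange a b 1).foldl pvStepB st := by
  apply PySem.List.foldl_congr_mem
  intro acc x hx
  have := (PySem.List.mem_pyRange_one).1 hx
  exact pvInnerEq x (by omega) acc

-- S(n,k) satisfies the recurrence S(n,k) = S(n-1,k) + n//k for n ≥ 1.
theorem pvS_succ (n k : Int) (hn : 1 ≤ n) (hk : k = 2 ∨ k = 5 ∨ k = 25) :
    pvS n k = pvS (n - 1) k + PySem.Int.floordiv n k := by
  have hk0 : (0 : Int) < k := by rcases hk with h | h | h <;> simp [h]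
  have hfdk : ∀ a : Int, PySem.Int.floordiv a k = a / k := fun a =>
    PySem.Int.floordiv_eq_ediv_of_pos hk0
  have hfd2 : ∀ a : Int, PySem.Int.floordiv a 2 = a / 2 := fun a =>
    PySem.Int.floordiv_eq_ediv_of_pos (by norm_num)
  have hmdk : ∀ a : Int, PySem.Int.mod a k = a % k := fun a =>
    PySem.Int.mod_eq_emod_of_pos hk0
  have hD : ∀ m : Int, 2 * (k * m * (m - 1) / 2) = k * m * (m - 1) := by
    intro m
    apply Int.mul_ediv_cancel'
    have h1 : Even ((m - 1) * m) := by simpa using Int.even_mul_succ_self (m - 1)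
    have h2 : (2 : Int) ∣ (m - 1) * m := h1.two_dvd
    have h3 : k * m * (m - 1) = ((m - 1) * m) * k := by ring
    rw [h3]
    exact h2.mul_right k
  simp only [pvS, hfdk, hfd2, hmdk, if_neg (show ¬ n < 0 by omega),
    if_neg (show ¬ n - 1 < 0 by omega)]
  have hqr := Int.mul_ediv_add_emod n k
  have hrem0 : 0 ≤ n % k := Int.emod_nonneg n (by omega)
  have hremk : n % k < k := Int.emod_lt_of_pos n hk0
  by_cases h0 : n % k = 0
  · have huniq := (Int.ediv_emod_unique (a := n - 1) (b := k) (q := n / k - 1)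
      (r := k - 1) hk0).mpr ⟨by linear_combination hqr - h0, by omega, by omega⟩
    rw [huniq.1, huniq.2, h0]
    have h1 := hD (n / k)
    have h2 := hD (n / k - 1)
    have h3 : 2 * (k * (n / k) * (n / k - 1) / 2) =
        2 * (k * (n / k - 1) * (n / k - 1 - 1) / 2) + 2 * ((n / k - 1) * k) := by
      linear_combination h1 - h2
    linarith [h3]
  · have huniq := (Int.ediv_emod_unique (a := n - 1) (b := k) (q := n / k)
      (r := n % k - 1) hk0).mpr ⟨by linear_combination hqr, by omega, by omega⟩
    rw [huniq.1, huniq.2]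
    ring

-- summing B's per-i increments over a..r gives the S-differences
theorem pvSumB (a : Int) (ha : 1 ≤ a) (r : Int) (hr : a - 1 ≤ r) (st : Int × Int × Int) :
    (PySem.List.pyRange a (r + 1) 1).foldl pvStepB st =
      (st.1 + (pvS r 2 - pvS (a - 1) 2), st.2.1 + (pvS r 5 - pvS (a - 1) 5),
        st.2.2 + (pvS r 25 - pvS (a - 1) 25)) := by
  induction r, hr using Int.le_induction generalizing st with
  | base =>
      rw [show a - 1 + 1 = a by ring, PySem.List.pyRange_one_eq_nil le_rfl]
      simp
  | succ n hn ih =>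
      rw [PySem.List.pyRange_one_succ_right (by omega : a ≤ n + 1), List.foldl_append]
      rw [ih st]
      simp only [List.foldl_cons, List.foldl_nil, pvStepB]
      have e2 := pvS_succ (n + 1) 2 (by omega) (by tauto)
      have e5 := pvS_succ (n + 1) 5 (by omega) (by tauto)
      have e25 := pvS_succ (n + 1) 25 (by omega) (by tauto)
      simp only [show n + 1 - 1 = n by ring] at e2 e5 e25
      simp only [Prod.mk.injEq]
      refine ⟨by linarith, by linarith, by linarith⟩

-- ===== VERDICT (by name: the statement is the Claim_ definition above) =====
theorem factorialsProductTrailingZeros_spec : Claim_equal_factorialsProductTrailingZeros := by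
  unfold Claim_equal_factorialsProductTrailingZeros
  intro l r _
  unfold Spec_factorialsProductTrailingZeros
  unfold factorialsProductTrailingZeros
  have hA : (PySem.List.pyRange l (r + 1) 1).foldl
      (fun (st : Int × Int × Int) i =>
        (PySem.List.pyRange 1 (i + 1) 1).foldl (fun (st : Int × Int × Int) j =>
          let ctr := if PySem.Int.mod j 25 == 0 then st.2.2 + 1 else st.2.2
          let two := if PySem.Int.mod j 2 == 0 then st.1 + 1 else st.1
          let five := if PySem.Int.mod j 5 == 0 then st.2.1 + 1 else st.2.1
          (two, five, ctr)) st) ((0, 0, 0) : Int × Int × Int)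
      = (PySem.List.pyRange l (r + 1) 1).foldl pvOuterA ((0, 0, 0) : Int × Int × Int) := rfl
  rw [hA]
  have key : (PySem.List.pyRange l (r + 1) 1).foldl pvOuterA ((0, 0, 0) : Int × Int × Int)
      = (PySem.List.pyRange (max l 1) (r + 1) 1).foldl pvStepB ((0, 0, 0) : Int × Int × Int) := by
    by_cases hl : 1 ≤ l
    · rw [max_eq_left hl]
      exact pvFoldEq l (r + 1) hl _
    · rw [max_eq_right (by omega)]
      have hskip := pvSkipNonpos (1 - l).toNat (r + 1) ((0, 0, 0) : Int × Int × Int)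
      rw [show (1 : Int) - ((1 - l).toNat : Int) = l by omega] at hskip
      rw [hskip]
      exact pvFoldEq 1 (r + 1) le_rfl _
  rw [key]
  by_cases hr2 : max l 1 - 1 ≤ r
  · rw [pvSumB (max l 1) (le_max_right l 1) r hr2]
    have hhi : max r (max l 1 - 1) = r := max_eq_left hr2
    simp [factorialsProductTrailingZeros_alt, hhi]
  · rw [PySem.List.pyRange_one_eq_nil (by omega)]
    have hhi : max r (max l 1 - 1) = max l 1 - 1 := max_eq_right (by omega)
    simp [factorialsProductTrailingZeros_alt, hhi]
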